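-- pv_equiv track=rewrite | github.com/ZenoAFfectionate/WhaleCode | code/tools/builtin/glob_tool.py | _convert_glob_to_fnmatch
-- ===== SOURCE A (Python) =====
-- from typing import Any, Dict, List, Optional
--
-- def _convert_glob_to_fnmatch(pattern: str) -> str:
--     """Convert a glob pattern to an fnmatch-compatible pattern.
--
--     * ``**`` -> ``*``  (fnmatch ``*`` matches everything incl. ``/``)
--     * lone ``*`` -> ``[!/]*``  (does **not** match ``/``)
--     * lone ``?`` -> ``[!/]``
--     """
--     result: List[str] = []
--     i, n = 0, len(pattern)
--     while i < n:
--         ch = pattern[i]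
--         if ch == "*" and i + 1 < n and pattern[i + 1] == "*":
--             result.append("*")
--             i += 2
--         elif ch == "*":
--             result.append("[!/]*")
--             i += 1
--         elif ch == "?":
--             result.append("[!/]")
--             i += 1
--         else:
--             result.append(ch)
--             i += 1
--     return "".join(result)
-- ===== SOURCE B (Python) =====
-- import re
--
-- _GLOB_TOKEN = re.compile(r"\*\*|\*|\?")
-- _FNMATCH_MAP = {"**": "*", "*": "[!/]*", "?": "[!/]"}
--
-- def _convert_glob_to_fnmatch(pattern: str) -> str:
--     """Convert a glob pattern to an fnmatch-compatible pattern (single regex pass)."""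
--     return _GLOB_TOKEN.sub(lambda m: _FNMATCH_MAP[m.group(0)], pattern)
-- ===== Notes on version B (the rewrite author's own statement) =====
-- stated objective: idiomatic
-- what changed: Replaces the hand-written index-while loop and piece list with a single re.sub pass using an ordered alternation (** before * before ?) and an explicit token-to-replacement dict; no index arithmetic or accumulator is maintained.
import Mathlib
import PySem

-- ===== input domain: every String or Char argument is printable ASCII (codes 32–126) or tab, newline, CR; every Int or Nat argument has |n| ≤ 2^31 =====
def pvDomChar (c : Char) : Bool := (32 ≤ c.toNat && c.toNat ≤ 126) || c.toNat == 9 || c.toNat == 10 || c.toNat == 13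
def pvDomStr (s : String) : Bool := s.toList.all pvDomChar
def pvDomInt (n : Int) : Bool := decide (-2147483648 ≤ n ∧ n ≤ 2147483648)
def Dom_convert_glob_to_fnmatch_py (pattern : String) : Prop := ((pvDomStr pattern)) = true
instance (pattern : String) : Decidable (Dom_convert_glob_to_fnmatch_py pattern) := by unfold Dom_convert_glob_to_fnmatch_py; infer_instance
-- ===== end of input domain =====

-- B replaces A's index-while loop with a single regex-substitution pass over the
-- fixed alternation `\*\*|\*|\?` and an explicit token→replacement map (idiomatic).

-- ===== PORT A =====
-- the while-loop of A: index i over the characters, list of pieces appended, joined at the end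
def convertGlobLoopA (cs : List Char) (n : Nat) (i : Nat) (result : List String) : String :=
  if _h : i < n then
    let ch := cs.getD i ' '
    if ch = '*' ∧ i + 1 < n ∧ cs.getD (i + 1) ' ' = '*' then
      convertGlobLoopA cs n (i + 2) (result ++ ["*"])
    else if ch = '*' then
      convertGlobLoopA cs n (i + 1) (result ++ ["[!/]*"])
    else if ch = '?' then
      convertGlobLoopA cs n (i + 1) (result ++ ["[!/]"])
    else
      convertGlobLoopA cs n (i + 1) (result ++ [String.ofList [ch]])
  else
    String.join result
termination_by n - i

def convert_glob_to_fnmatch_py (pattern : String) : String :=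
  convertGlobLoopA pattern.toList pattern.toList.length 0 []

-- ===== PORT B =====
-- hand port of re.sub with the fixed alternation r"\*\*|\*|\?" and the map
-- {"**":"*", "*":"[!/]*", "?":"[!/]"}: the regex engine's greedy leftmost
-- non-overlapping scan over that alternation is exactly this recursion
-- (longest/first alternative tried at each position, non-matches copied through).
def globSubB : List Char → List Char
  | '*' :: '*' :: rest => '*' :: globSubB rest
  | '*' :: rest => '[' :: '!' :: '/' :: ']' :: '*' :: globSubB rest
  | '?' :: rest => '[' :: '!' :: '/' :: ']' :: globSubB rest
  | c :: rest => c :: globSubB rest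
  | [] => []

def convert_glob_to_fnmatch_py_alt (pattern : String) : String :=
  String.ofList (globSubB pattern.toList)

-- ===== PRECONDITION & SPEC =====
def Spec_convert_glob_to_fnmatch_py (pattern : String) (out : String) : Prop := out = convert_glob_to_fnmatch_py_alt pattern
instance (pattern : String) (out : String) : Decidable (Spec_convert_glob_to_fnmatch_py pattern out) := by unfold Spec_convert_glob_to_fnmatch_py; infer_instance

-- ===== CLAIM (what is proved, stated in full; the proofs are below) =====
def Claim_equal_convert_glob_to_fnmatch_py : Prop := ∀ (pattern : String), Dom_convert_glob_to_fnmatch_py pattern → Spec_convert_glob_to_fnmatch_py pattern (convert_glob_to_fnmatch_py pattern)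

-- ===== LEMMAS AND PROOFS =====

lemma joinSnocGlob (l : List String) (s : String) :
    String.join (l ++ [s]) = String.join l ++ s := by
  simp [String.join, List.foldl_append]

lemma globSubB_star_cons (d : Char) (r : List Char) (hd : d ≠ '*') :
    globSubB ('*' :: d :: r) = '[' :: '!' :: '/' :: ']' :: '*' :: globSubB (d :: r) := by
  rw [globSubB.eq_def]
  split
  all_goals rename_i heq
  all_goals simp_all
  all_goals (obtain ⟨h1, h2⟩ := heq; subst h1; subst h2; simp_all)

lemma globSubB_other (c : Char) (r : List Char) (hs : c ≠ '*') (hq : c ≠ '?') :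
    globSubB (c :: r) = c :: globSubB r := by
  rw [globSubB.eq_def]
  split
  all_goals rename_i heq
  all_goals simp_all

lemma convertGlobLoopA_eq (cs : List Char) :
    ∀ k i result, cs.length - i ≤ k →
      convertGlobLoopA cs cs.length i result
        = String.join result ++ String.ofList (globSubB (cs.drop i)) := by
  intro k
  induction k with
  | zero =>
    intro i result hk
    have hni : ¬ i < cs.length := by omega
    rw [convertGlobLoopA]
    simp [hni, List.drop_eq_nil_of_le (by omega : cs.length ≤ i), globSubB]
  | succ k ih =>
    intro i result hk
    by_cases h : i < cs.length
    · have hdrop : cs.drop i = cs[i] :: cs.drop (i + 1) :=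
        List.drop_eq_getElem_cons h
      have hget : cs.getD i ' ' = cs[i] := List.getD_eq_getElem cs ' ' h
      rw [convertGlobLoopA]
      simp only [h, dif_pos, hget]
      by_cases h1 : cs[i] = '*' ∧ i + 1 < cs.length ∧ cs.getD (i + 1) ' ' = '*'
      · obtain ⟨hc, h2, hc2⟩ := h1
        have hget2 : cs.getD (i + 1) ' ' = cs[i + 1] := List.getD_eq_getElem cs ' ' h2
        have hc2' : cs[i + 1] = '*' := by rw [← hget2]; exact hc2
        have hdrop2 : cs.drop (i + 1) = cs[i + 1] :: cs.drop (i + 2) :=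
          List.drop_eq_getElem_cons h2
        rw [if_pos ⟨hc, h2, hc2⟩, ih (i + 2) _ (by omega), hdrop, hdrop2, hc, hc2',
          joinSnocGlob, String.append_assoc]
        congr 1
        rw [show ("*" : String) = String.ofList ['*'] from rfl, ← String.ofList_append]
        rfl
      · rw [if_neg h1]
        by_cases hc : cs[i] = '*'
        · -- lone '*': either at the end of the pattern, or the next char is not '*'
          rw [if_pos hc, ih (i + 1) _ (by omega), hdrop, hc]
          have hstar : globSubB ('*' :: cs.drop (i + 1))
              = '[' :: '!' :: '/' :: ']' :: '*' :: globSubB (cs.drop (i + 1)) := by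
            by_cases h2 : i + 1 < cs.length
            · have hget2 : cs.getD (i + 1) ' ' = cs[i + 1] := List.getD_eq_getElem cs ' ' h2
              have hne : cs[i + 1] ≠ '*' := by
                intro hcontra
                exact h1 ⟨hc, h2, by rw [hget2, hcontra]⟩
              rw [List.drop_eq_getElem_cons h2, globSubB_star_cons _ _ hne,
                ← List.drop_eq_getElem_cons h2]
            · rw [List.drop_eq_nil_of_le (by omega : cs.length ≤ i + 1)]
              rfl
          rw [hstar, joinSnocGlob, String.append_assoc]
          congr 1
          rw [show ("[!/]*" : String) = String.ofList ['[', '!', '/', ']', '*'] from rfl,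
            ← String.ofList_append]
          rfl
        · rw [if_neg hc]
          by_cases hq : cs[i] = '?'
          · rw [if_pos hq, ih (i + 1) _ (by omega), hdrop, hq, joinSnocGlob,
              String.append_assoc]
            congr 1
            rw [show ("[!/]" : String) = String.ofList ['[', '!', '/', ']'] from rfl,
              ← String.ofList_append]
            rfl
          · rw [if_neg hq, ih (i + 1) _ (by omega), hdrop, globSubB_other _ _ hc hq,
              joinSnocGlob, String.append_assoc]
            congr 1
            rw [← String.ofList_append]
            rfl
    · rw [convertGlobLoopA]
      simp [h, List.drop_eq_nil_of_le (by omega : cs.length ≤ i), globSubB]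

-- ===== VERDICT (by name: the statement is the Claim_ definition above) =====
theorem convert_glob_to_fnmatch_py_spec : Claim_equal_convert_glob_to_fnmatch_py := by
  intro pattern _
  unfold Spec_convert_glob_to_fnmatch_py convert_glob_to_fnmatch_py convert_glob_to_fnmatch_py_alt
  rw [convertGlobLoopA_eq pattern.toList pattern.toList.length 0 [] (by omega)]
  rfl
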